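-- pv_equiv track=rewrite | github.com/EbenezerSkrudge/Skald | ui/keymap.py | build_direction_map
-- ===== SOURCE A (Python) =====
-- from typing import Dict, List, Optional
--
-- _CANONICAL_DIRS = [
--     "north", "south", "east", "west",
--     "northeast", "northwest", "southeast", "southwest",
--     "up", "down"
-- ]
--
-- def build_direction_map(exits: Dict[str, int]) -> Dict[str, str]:
--     direction_map = {}
--     for canonical in _CANONICAL_DIRS:
--         for exit_name in exits:
--             # Match if exit_name == canonical or starts with canonical + known suffix
--             if exit_name == canonical:
--                 direction_map[canonical] = exit_name
--                 break
--             suffix = exit_name[len(canonical):]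
--             if exit_name.startswith(canonical) and suffix in ("up", "down", "in", "out", ""):
--                 direction_map[canonical] = exit_name
--                 break
--     return direction_map
-- ===== SOURCE B (Python) =====
-- from typing import Dict
--
-- _CANONICAL_DIRS = [
--     "north", "south", "east", "west",
--     "northeast", "northwest", "southeast", "southwest",
--     "up", "down"
-- ]
--
-- _SUFFIXES = ("up", "down", "in", "out")
--
--
-- def _canonical_of(name, canon_set):
--     """Derive the canonical direction a given exit name stands for, if any."""
--     if name in canon_set:
--         return name
--     for suf in _SUFFIXES:
--         if name.endswith(suf):
--             prefix = name[:-len(suf)]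
--             if prefix in canon_set:
--                 return prefix
--     return None
--
--
-- def build_direction_map(exits: Dict[str, int]) -> Dict[str, str]:
--     canon_set = set(_CANONICAL_DIRS)
--     first = {}
--     for exit_name in exits:
--         c = _canonical_of(exit_name, canon_set)
--         if c is not None and c not in first:
--             first[c] = exit_name
--     return {c: first[c] for c in _CANONICAL_DIRS if c in first}
-- ===== Notes on version B (the rewrite author's own statement) =====
-- stated objective: faster
-- what changed: Instead of rescanning the exits once per canonical direction (10 nested scans), B makes a single pass over the exits, deriving each exit's canonical by set lookup / known-suffix stripping and keeping the first exit per canonical, then reads the result off in canonical order.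
import Mathlib
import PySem

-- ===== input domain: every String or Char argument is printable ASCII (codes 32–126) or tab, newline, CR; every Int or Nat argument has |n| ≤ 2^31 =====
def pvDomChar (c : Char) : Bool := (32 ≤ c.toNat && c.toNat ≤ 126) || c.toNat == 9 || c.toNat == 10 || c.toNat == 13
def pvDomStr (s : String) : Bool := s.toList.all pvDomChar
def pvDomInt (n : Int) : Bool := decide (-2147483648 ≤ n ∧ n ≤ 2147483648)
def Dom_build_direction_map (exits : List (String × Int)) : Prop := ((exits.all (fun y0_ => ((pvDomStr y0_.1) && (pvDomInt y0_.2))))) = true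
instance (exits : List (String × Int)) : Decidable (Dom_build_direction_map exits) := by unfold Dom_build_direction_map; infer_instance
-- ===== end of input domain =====

-- B replaces A's canonical-by-canonical rescans of the exits with ONE pass over the exits that derives each
-- exit's canonical by set lookup / suffix-stripping, then reads the results off in canonical order (objective:
-- alternative decomposition; equal return value proved below).

-- ===== PORT A =====
def pvCanonDirs : List String :=
  ["north", "south", "east", "west",
   "northeast", "northwest", "southeast", "southwest",
   "up", "down"]

-- A's inner 'for exit_name in exits: … break' loop: first exit matching `canonical`
def pvFindMatch (canonical : String) : List String → Option String
  | [] => none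
  | e :: rest =>
    if e == canonical then some e
    else
      let suffix := PySem.Str.slice e (some (PySem.Str.len canonical)) none
      if PySem.Str.startswith e canonical && ["up", "down", "in", "out", ""].contains suffix then
        some e
      else pvFindMatch canonical rest

def build_direction_map (exits : List (String × Int)) : List (String × String) :=
  (pvCanonDirs.foldl (fun direction_map canonical =>
      match pvFindMatch canonical (exits.map Prod.fst) with
      | some e => direction_map.insert canonical e
      | none => direction_map)
    (PySem.Dict.empty : PySem.Dict String String)).items

-- ===== PORT B =====
def pvCanonSet : PySem.Set String := PySem.Set.ofList pvCanonDirs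

def pvSuffixes : List String := ["up", "down", "in", "out"]

-- Source B's `_canonical_of` suffix loop
def pvSuffixLoop (name : String) : List String → Option String
  | [] => none
  | suf :: rest =>
    if PySem.Str.endswith name suf then
      let prefx := PySem.Str.slice name none (some (-(PySem.Str.len suf)))
      if pvCanonSet.contains prefx then some prefx else pvSuffixLoop name rest
    else pvSuffixLoop name rest

def pvCanonicalOf (name : String) : Option String :=
  if pvCanonSet.contains name then some name
  else pvSuffixLoop name pvSuffixes

def build_direction_map_alt (exits : List (String × Int)) : List (String × String) :=
  let first := exits.foldl (fun first p =>
      match pvCanonicalOf p.1 with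
      | some c => if first.contains c then first else first.insert c p.1
      | none => first)
    (PySem.Dict.empty : PySem.Dict String String)
  pvCanonDirs.filterMap (fun c => (first.get? c).map (fun e => (c, e)))

-- ===== PRECONDITION & SPEC =====
def Spec_build_direction_map (exits : List (String × Int)) (out : List (String × String)) : Prop := out = build_direction_map_alt exits
instance (exits : List (String × Int)) (out : List (String × String)) : Decidable (Spec_build_direction_map exits out) := by unfold Spec_build_direction_map; infer_instance

-- ===== CLAIM (what is proved, stated in full; the proofs are below) =====
def Claim_equal_build_direction_map : Prop := ∀ (exits : List (String × Int)), Dom_build_direction_map exits → Spec_build_direction_map exits (build_direction_map exits)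

-- ===== LEMMAS AND PROOFS =====

-- A's matching condition on one exit name, as a predicate
def pvMatchP (canonical e : String) : Bool :=
  e == canonical ||
    (PySem.Str.startswith e canonical &&
      ["up", "down", "in", "out", ""].contains (PySem.Str.slice e (some (PySem.Str.len canonical)) none))

lemma pvFindMatch_eq_find? (c : String) (keys : List String) :
    pvFindMatch c keys = keys.find? (fun e => pvMatchP c e) := by
  induction keys with
  | nil => rfl
  | cons e rest ih =>
    unfold pvFindMatch
    rw [List.find?]
    cases h1 : (e == c) with
    | true => simp only [pvMatchP, h1, Bool.true_or, if_true]
    | false =>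
      cases h2 : (PySem.Str.startswith e c &&
          ["up", "down", "in", "out", ""].contains (PySem.Str.slice e (some (PySem.Str.len c)) none)) with
      | true => simp only [pvMatchP, h1, h2, Bool.false_or, Bool.false_eq_true, if_false, if_true]
      | false =>
        simp only [pvMatchP, h1, h2, Bool.false_or, Bool.false_eq_true, if_false, ih]

-- matching = "e is canonical-plus-known-suffix", stated on code-point lists
lemma pvMatchP_iff (c e : String) :
    pvMatchP c e = true ↔ ∃ s ∈ ["up", "down", "in", "out", ""], e.toList = c.toList ++ s.toList := by
  have hslice : (PySem.Str.slice e (some (PySem.Str.len c)) none).toList = e.toList.drop c.toList.length := by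
    rw [PySem.Str.toList_slice, PySem.Chars.slice_eq_listSlice, PySem.Str.len_eq,
      PySem.List.slice_from_natCast]
  unfold pvMatchP
  constructor
  · intro h
    rcases Bool.or_eq_true_iff.mp h with h1 | h2
    · refine ⟨"", by simp, ?_⟩
      rw [eq_of_beq h1]
      simp
    · obtain ⟨hpre, hmem⟩ := Bool.and_eq_true_iff.mp h2
      rw [PySem.Str.startswith_eq] at hpre
      obtain ⟨t, ht⟩ := (PySem.Chars.startswith_iff _ _).mp hpre
      refine ⟨_, List.mem_of_elem_eq_true hmem, ?_⟩
      rw [hslice, ← ht, List.drop_left]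
  · rintro ⟨s, hs, ht⟩
    apply Bool.or_eq_true_iff.mpr
    right
    apply Bool.and_eq_true_iff.mpr
    constructor
    · rw [PySem.Str.startswith_eq]
      exact (PySem.Chars.startswith_iff _ _).mpr ⟨s.toList, ht.symm⟩
    · have : PySem.Str.slice e (some (PySem.Str.len c)) none = s := by
        apply String.toList_inj.mp
        rw [hslice, ht, List.drop_left]
      rw [this]
      exact List.elem_eq_true_of_mem hs

lemma pvSuffixLoop_eq_some (e c : String) (sufs : List String) (h : pvSuffixLoop e sufs = some c) :
    ∃ suf ∈ sufs, PySem.Str.endswith e suf = true ∧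
      c = PySem.Str.slice e none (some (-(PySem.Str.len suf))) ∧ pvCanonSet.contains c = true := by
  induction sufs with
  | nil => exact absurd h (by simp [pvSuffixLoop])
  | cons suf rest ih =>
    unfold pvSuffixLoop at h
    cases h1 : PySem.Str.endswith e suf with
    | false =>
      simp only [h1, Bool.false_eq_true, if_false] at h
      obtain ⟨s, hs, h3⟩ := ih h
      exact ⟨s, by simp [hs], h3⟩
    | true =>
      simp only [h1, if_true] at h
      cases h2 : pvCanonSet.contains (PySem.Str.slice e none (some (-(PySem.Str.len suf)))) with
      | false =>
        simp only [h2, Bool.false_eq_true, if_false] at h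
        obtain ⟨s, hs, h3⟩ := ih h
        exact ⟨s, by simp [hs], h3⟩
      | true =>
        simp only [h2, if_true] at h
        exact ⟨suf, by simp, h1, (Option.some_inj.mp h).symm, (Option.some_inj.mp h) ▸ h2⟩

-- Source B's derivation inverts A's canonical-plus-suffix decomposition
lemma pvCanonicalOf_eq_iff (c e : String) (hc : c ∈ pvCanonDirs) :
    pvCanonicalOf e = some c ↔ pvMatchP c e = true := by
  constructor
  · intro h
    unfold pvCanonicalOf at h
    split_ifs at h with h1
    · -- name itself is canonical
      apply (pvMatchP_iff c e).mpr
      refine ⟨"", by simp, ?_⟩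
      rw [← Option.some_inj.mp h]
      simp
    · obtain ⟨suf, hsuf, hend, hcs, _⟩ := pvSuffixLoop_eq_some e c pvSuffixes h
      rw [PySem.Str.endswith_eq] at hend
      obtain ⟨t, ht⟩ := (PySem.Chars.endswith_iff _ _).mp hend
      have hk : 0 < suf.toList.length := by
        fin_cases hsuf <;> decide
      have hslice : (PySem.Str.slice e none (some (-(PySem.Str.len suf)))).toList
          = e.toList.take (e.toList.length - suf.toList.length) := by
        rw [PySem.Str.toList_slice, PySem.Chars.slice_eq_listSlice, PySem.Str.len_eq,
          PySem.List.slice_to_neg_natCast _ _ hk]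
      have hct : c.toList = t := by
        rw [hcs, hslice, ← ht]
        simp
      apply (pvMatchP_iff c e).mpr
      refine ⟨suf, ?_, ?_⟩
      · fin_cases hsuf <;> simp
      · rw [hct, ht]
  · intro h
    obtain ⟨s, hs, ht⟩ := (pvMatchP_iff c e).mp h
    have he : e = String.ofList (c.toList ++ s.toList) := by
      apply String.toList_inj.mp
      rw [ht, String.toList_ofList]
    rw [he]
    fin_cases hc <;> fin_cases hs <;> decide

-- B's first-pass dict answers exactly "first exit whose canonical is c"
lemma pvFirst_get? (keys : List String) (m : PySem.Dict String String) (c : String) :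
    (keys.foldl (fun first e =>
        match pvCanonicalOf e with
        | some c' => if first.contains c' then first else first.insert c' e
        | none => first) m).get? c
      = ((m.get? c).or (keys.find? (fun e => pvCanonicalOf e == some c))) := by
  induction keys generalizing m with
  | nil => simp [List.find?]
  | cons e rest ih =>
    rw [List.foldl_cons, List.find?]
    obtain hco | ⟨c', hco⟩ := Option.eq_none_or_eq_some (pvCanonicalOf e)
    · simp only [hco, show ((none : Option String) == some c) = false from rfl]
      exact ih m
    · simp only [hco, Option.some_beq_some]
      by_cases hcc : c' = c
      · subst hcc
        simp only [beq_self_eq_true]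
        by_cases hmem : m.contains c' = true
        · rw [if_pos hmem, ih]
          have hsome : (m.get? c').isSome = true := by
            rw [← PySem.Dict.contains_eq_isSome_get?]; exact hmem
          obtain ⟨v, hv⟩ := Option.isSome_iff_exists.mp hsome
          rw [hv]
          rfl
        · rw [if_neg hmem, ih]
          have hnone : m.get? c' = none := by
            rw [PySem.Dict.contains_eq_isSome_get?] at hmem
            exact Option.not_isSome_iff_eq_none.mp hmem
          rw [hnone, PySem.Dict.get?_insert_self]
          rfl
      · have hp : (c' == c) = false := beq_eq_false_iff_ne.mpr hcc
        rw [hp]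
        by_cases hmem : m.contains c' = true
        · rw [if_pos hmem]
          exact ih m
        · rw [if_neg hmem, ih, PySem.Dict.get?_insert_of_ne _ _ (fun h => hcc h.symm)]

-- A's outer fold over fresh distinct canonicals appends exactly the filterMap B reads off
lemma pvFoldA_items (F : String → Option String) (cs : List String)
    (dm : PySem.Dict String String) (hnd : cs.Nodup) (hfresh : ∀ c ∈ cs, dm.contains c = false) :
    (cs.foldl (fun direction_map canonical =>
        match F canonical with
        | some e => direction_map.insert canonical e
        | none => direction_map) dm).items
      = dm.items ++ cs.filterMap (fun c => (F c).map (fun e => (c, e))) := by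
  induction cs generalizing dm with
  | nil => simp
  | cons c cs ih =>
    obtain ⟨hc, hnd'⟩ := List.nodup_cons.mp hnd
    rw [List.foldl_cons, List.filterMap_cons]
    cases hF : F c with
    | none =>
      simp only
      exact ih dm hnd' (fun c' hc' => hfresh c' (List.mem_cons_of_mem _ hc'))
    | some e =>
      simp only
      rw [ih (dm.insert c e) hnd' ?_, PySem.Dict.items_insert_of_not_contains dm e
        (hfresh c (List.mem_cons_self))]
      · simp
      · intro c' hc'
        rw [PySem.Dict.contains_insert]
        have h1 : (c' == c) = false := by
          simp only [beq_eq_false_iff_ne, ne_eq]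
          exact fun h => hc (h ▸ hc')
        rw [h1, hfresh c' (List.mem_cons_of_mem _ hc')]
        rfl

-- ===== VERDICT (by name: the statement is the Claim_ definition above) =====
-- folding over the pairs while keying on .1 is folding over the keys
lemma pvFold_pairs (exits : List (String × Int)) (m : PySem.Dict String String) :
    exits.foldl (fun first p =>
        match pvCanonicalOf p.1 with
        | some c => if first.contains c then first else first.insert c p.1
        | none => first) m
      = (exits.map Prod.fst).foldl (fun first e =>
        match pvCanonicalOf e with
        | some c' => if first.contains c' then first else first.insert c' e
        | none => first) m := by
  rw [List.foldl_map]

-- ===== VERDICT (by name: the statement is the Claim_ definition above) =====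
theorem build_direction_map_spec : Claim_equal_build_direction_map := by
  intro exits _
  unfold Spec_build_direction_map build_direction_map build_direction_map_alt
  rw [pvFoldA_items (fun c => pvFindMatch c (exits.map Prod.fst)) pvCanonDirs PySem.Dict.empty
    (by decide) (fun c _ => PySem.Dict.contains_empty c),
    show (PySem.Dict.empty : PySem.Dict String String).items = [] from rfl, List.nil_append]
  apply List.filterMap_congr
  intro c hc
  rw [pvFindMatch_eq_find?, pvFold_pairs, pvFirst_get?, PySem.Dict.get?_empty, Option.none_or]
  have hpred : (fun e => pvMatchP c e) = (fun e => pvCanonicalOf e == some c) := by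
    funext e
    exact Bool.coe_iff_coe.mp
      ⟨fun h => beq_iff_eq.mpr ((pvCanonicalOf_eq_iff c e hc).mpr h),
       fun h => (pvCanonicalOf_eq_iff c e hc).mp (beq_iff_eq.mp h)⟩
  rw [hpred]
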